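-- pv_equiv track=rewrite | github.com/NetScalerTrainer/GEO_IP | geo4.py | clean_file_path
-- ===== SOURCE A (Python) =====
-- def clean_file_path(raw_path: str) -> str:
--     """Clean up file path from drag-and-drop input."""
--     # Remove surrounding quotes and whitespace
--     file_path = raw_path.strip().strip('\'"')
--
--     # Handle escaped characters using a simple approach
--     # Replace common escape sequences
--     replacements = [
--         ('\\ ', ' '),      # escaped space
--         ('\\[', '['),      # escaped opening bracket
--         ('\\]', ']'),      # escaped closing bracket
--         ('\\(', '('),      # escaped opening parenthesis
--         ('\\)', ')'),      # escaped closing parenthesis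
--         ('\\#', '#'),      # escaped hash
--         ('\\&', '&'),      # escaped ampersand
--         ('\\$', '$'),      # escaped dollar sign
--         ('\\%', '%'),      # escaped percent
--         ('\\@', '@'),      # escaped at sign
--         ('\\!', '!'),      # escaped exclamation
--         ('\\^', '^'),      # escaped caret
--         ('\\*', '*'),      # escaped asterisk
--         ('\\+', '+'),      # escaped plus
--         ('\\=', '='),      # escaped equals
--         ('\\{', '{'),      # escaped opening brace
--         ('\\}', '}'),      # escaped closing brace
--         ('\\|', '|'),      # escaped pipe
--         ('\\"', '"'),      # escaped quote
--         ("\\'", "'"),      # escaped apostrophe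
--     ]
--
--     for escaped, unescaped in replacements:
--         file_path = file_path.replace(escaped, unescaped)
--
--     # Handle escaped backslashes last to avoid conflicts
--     file_path = file_path.replace('\\\\', '\\')
--
--     return file_path
-- ===== SOURCE B (Python) =====
-- RECOGNIZED = set(' []()#&$%@!^*+={}|"\'')
--
--
-- def clean_file_path(raw_path: str) -> str:
--     """Clean up file path from drag-and-drop input (single-pass scanner)."""
--     file_path = raw_path.strip().strip('\'"')
--     out = []
--     i = 0
--     n = len(file_path)
--     while i < n:
--         ch = file_path[i]
--         if ch == '\\' and i + 1 < n:
--             nxt = file_path[i + 1]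
--             if nxt == '\\':
--                 out.append('\\')
--                 i += 2
--             elif nxt in RECOGNIZED:
--                 out.append(nxt)
--                 i += 2
--             else:
--                 out.append('\\')
--                 i += 1
--         else:
--             out.append(ch)
--             i += 1
--     return ''.join(out)
-- ===== Notes on version B (the rewrite author's own statement) =====
-- stated objective: alternative
-- what changed: A unescapes by 21 sequential full-string replace passes (one per escapable character, then the double-backslash pass); B resolves every escape in a single left-to-right scan over the stripped string with one recognized-character set; both are linear, and A's C-implemented str.replace passes are not slower in practice.
import Mathlib
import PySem

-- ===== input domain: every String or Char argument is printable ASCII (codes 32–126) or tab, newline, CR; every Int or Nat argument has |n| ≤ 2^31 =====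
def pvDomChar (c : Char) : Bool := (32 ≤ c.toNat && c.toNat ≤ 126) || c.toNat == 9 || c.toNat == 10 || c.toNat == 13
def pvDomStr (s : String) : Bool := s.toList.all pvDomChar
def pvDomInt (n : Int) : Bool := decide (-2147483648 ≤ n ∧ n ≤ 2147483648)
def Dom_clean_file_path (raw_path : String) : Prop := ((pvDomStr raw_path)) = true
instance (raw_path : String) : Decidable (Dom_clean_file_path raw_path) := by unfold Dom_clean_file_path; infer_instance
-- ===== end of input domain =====

-- B replaces A's 21 sequential full-string replace passes by one left-to-right scan that
-- resolves each backslash escape in place (objective: alternative algorithm, same result).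

-- ===== PORT A =====
def pvReplacements : List (String × String) :=
  [("\\ ", " "), ("\\[", "["), ("\\]", "]"), ("\\(", "("), ("\\)", ")"),
   ("\\#", "#"), ("\\&", "&"), ("\\$", "$"), ("\\%", "%"), ("\\@", "@"),
   ("\\!", "!"), ("\\^", "^"), ("\\*", "*"), ("\\+", "+"), ("\\=", "="),
   ("\\{", "{"), ("\\}", "}"), ("\\|", "|"), ("\\\"", "\""), ("\\'", "'")]

def clean_file_path (raw_path : String) : String :=
  let file_path := PySem.Str.stripChars (PySem.Str.strip raw_path) "'\""
  let file_path := pvReplacements.foldl (fun fp p => PySem.Str.replace fp p.1 p.2) file_path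
  PySem.Str.replace file_path "\\\\" "\\"

-- ===== PORT B =====
def pvRecognized : List Char :=
  [' ', '[', ']', '(', ')', '#', '&', '$', '%', '@', '!', '^', '*', '+', '=', '{', '}', '|', '"', '\'']

def pvUnescape : List Char → List Char
  | [] => []
  | [c] => [c]
  | c :: d :: t =>
    if c = '\\' then
      if d = '\\' then '\\' :: pvUnescape t
      else if d ∈ pvRecognized then d :: pvUnescape t
      else '\\' :: pvUnescape (d :: t)
    else c :: pvUnescape (d :: t)

def clean_file_path_alt (raw_path : String) : String :=
  let file_path := PySem.Str.stripChars (PySem.Str.strip raw_path) "'\""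
  String.ofList (pvUnescape file_path.toList)

-- ===== PRECONDITION & SPEC =====
def Spec_clean_file_path (raw_path : String) (out : String) : Prop := out = clean_file_path_alt raw_path
instance (raw_path : String) (out : String) : Decidable (Spec_clean_file_path raw_path out) := by unfold Spec_clean_file_path; infer_instance

-- ===== CLAIM (what is proved, stated in full; the proofs are below) =====
def Claim_equal_clean_file_path : Prop := ∀ (raw_path : String), Dom_clean_file_path raw_path → Spec_clean_file_path raw_path (clean_file_path raw_path)

-- ===== LEMMAS AND PROOFS =====

/-- One pass of Python's `s.replace(old, new)` for a two-character pattern, as a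
structural recursion (mirrors `PySem.Chars.replace.go` without the fuel). -/
def rep2 (a b : Char) (r : List Char) : List Char → List Char
  | [] => []
  | [x] => [x]
  | x :: y :: t =>
    if x = a ∧ y = b then r ++ rep2 a b r t
    else x :: rep2 a b r (y :: t)

theorem go_eq (a b : Char) (r : List Char) :
    ∀ (fuel : Nat) (l acc : List Char), l.length ≤ fuel →
      PySem.Chars.replace.go [a, b] r fuel l acc = acc.reverse ++ rep2 a b r l := by
  intro fuel
  induction fuel with
  | zero =>
    intro l acc h
    cases l with
    | nil => simp [PySem.Chars.replace.go, rep2]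
    | cons c t => simp at h
  | succ n ih =>
    intro l acc h
    cases l with
    | nil => simp [PySem.Chars.replace.go, rep2]
    | cons c t =>
      rw [PySem.Chars.replace.go]
      by_cases hp : List.isPrefixOf [a, b] (c :: t) = true
      · cases t with
        | nil => simp at hp
        | cons y t2 =>
          simp only [List.isPrefixOf, Bool.and_eq_true, beq_iff_eq] at hp
          obtain ⟨hc, hy, -⟩ := hp
          subst hc; subst hy
          simp only [List.isPrefixOf, BEq.refl, Bool.and_self, if_pos, List.length_cons,
            List.drop_succ_cons, List.drop_zero, List.length_nil]
          rw [ih t2 (r.reverse ++ acc) (by simp at h ⊢; omega)]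
          simp [rep2]
      · simp only [hp, if_neg, Bool.false_eq_true, not_false_eq_true]
        rw [ih t (c :: acc) (by simp at h ⊢; omega)]
        cases t with
        | nil => simp [rep2]
        | cons y t2 =>
          simp only [List.isPrefixOf, Bool.and_eq_true, beq_iff_eq] at hp
          rw [show rep2 a b r (c :: y :: t2) = c :: rep2 a b r (y :: t2) by
            rw [rep2]; rw [if_neg]; intro ⟨h1, h2⟩; exact hp ⟨h1.symm, h2.symm, by simp⟩]
          simp

theorem replace_eq_rep2 (a b : Char) (r l : List Char) :
    PySem.Chars.replace l [a, b] r = rep2 a b r l := by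
  rw [PySem.Chars.replace]
  rw [go_eq a b r l.length l [] (le_refl _)]
  rfl

theorem rep2_skip (a b : Char) (r : List Char) (x : Char) (l : List Char) (hx : x ≠ a) :
    rep2 a b r (x :: l) = x :: rep2 a b r l := by
  cases l with
  | nil => simp [rep2]
  | cons y t => rw [rep2, if_neg]; intro ⟨h1, _⟩; exact hx h1

/-- `\c`→`c` replacement passes a backslash run unchanged when the next char is not `c`. -/
theorem rep2_run_pass (b : Char) (hb : b ≠ '\\') (n : Nat) (rest : List Char)
    (hrest : rest = [] ∨ ∃ x t, rest = x :: t ∧ x ≠ b) :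
    rep2 '\\' b [b] (List.replicate n '\\' ++ rest)
      = List.replicate n '\\' ++ rep2 '\\' b [b] rest := by
  induction n with
  | zero => simp
  | succ m ih =>
    rw [List.replicate_succ, List.cons_append, List.cons_append]
    cases m with
    | zero =>
      simp only [List.replicate_zero, List.nil_append]
      rcases hrest with rfl | ⟨x, t, rfl, hx⟩
      · simp [rep2]
      · rw [rep2, if_neg (by intro ⟨_, h2⟩; exact hx h2)]
    | succ k =>
      rw [show List.replicate (k+1) '\\' ++ rest = '\\' :: (List.replicate k '\\' ++ rest) by
            rw [List.replicate_succ, List.cons_append]]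
      rw [rep2, if_neg (by intro ⟨_, h2⟩; exact hb h2.symm)]
      rw [show '\\' :: (List.replicate k '\\' ++ rest) = List.replicate (k+1) '\\' ++ rest by
            rw [List.replicate_succ, List.cons_append]]
      rw [ih]

/-- `\c`→`c` replacement consumes the last backslash of a run when `c` follows. -/
theorem rep2_match (b : Char) (hb : b ≠ '\\') (n : Nat) (t : List Char) :
    rep2 '\\' b [b] (List.replicate (n+1) '\\' ++ b :: t)
      = List.replicate n '\\' ++ b :: rep2 '\\' b [b] t := by
  induction n with
  | zero => simp [rep2]
  | succ m ih =>
    rw [List.replicate_succ, List.cons_append]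
    rw [show List.replicate (m+1) '\\' ++ b :: t = '\\' :: (List.replicate m '\\' ++ b :: t) by
          rw [List.replicate_succ, List.cons_append]]
    rw [rep2, if_neg (by intro ⟨_, h2⟩; exact hb h2.symm)]
    rw [show '\\' :: (List.replicate m '\\' ++ b :: t) = List.replicate (m+1) '\\' ++ b :: t by
          rw [List.replicate_succ, List.cons_append]]
    rw [ih, List.replicate_succ, List.cons_append]

/-- `\\`→`\` halves a backslash run (rounding up) when no backslash follows. -/
theorem rep2_bs_run (n : Nat) (rest : List Char)
    (hrest : rest = [] ∨ ∃ x t, rest = x :: t ∧ x ≠ '\\') :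
    rep2 '\\' '\\' ['\\'] (List.replicate n '\\' ++ rest)
      = List.replicate ((n+1)/2) '\\' ++ rep2 '\\' '\\' ['\\'] rest := by
  induction n using Nat.strong_induction_on with
  | _ n ih =>
    match n with
    | 0 => simp
    | 1 =>
      simp only [List.replicate_one, List.cons_append, List.nil_append]
      rcases hrest with rfl | ⟨x, t, rfl, hx⟩
      · simp [rep2]
      · rw [rep2, if_neg (by intro ⟨_, h2⟩; exact hx h2)]
        rfl
    | (m+2) =>
      rw [List.replicate_succ, List.replicate_succ, List.cons_append, List.cons_append]
      rw [rep2, if_pos ⟨rfl, rfl⟩]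
      rw [ih m (by omega)]
      rw [show ((m+2)+1)/2 = (m+1)/2 + 1 by omega]
      rw [List.replicate_succ]
      simp

/-- Fold of the twenty `\c`→`c` passes, in A's order, on the character level. -/
def applyAll (cs : List Char) (l : List Char) : List Char :=
  cs.foldl (fun acc c => rep2 '\\' c [c] acc) l

theorem applyAll_nil (cs : List Char) : applyAll cs [] = [] := by
  induction cs with
  | nil => rfl
  | cons c cs ih => simpa [applyAll, List.foldl, rep2] using ih

theorem applyAll_cons (cs : List Char) (x : Char) (l : List Char) (hx : x ≠ '\\') :
    applyAll cs (x :: l) = x :: applyAll cs l := by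
  induction cs generalizing l with
  | nil => rfl
  | cons c cs ih =>
    simp only [applyAll, List.foldl]
    rw [rep2_skip '\\' c [c] x l hx]
    exact ih (rep2 '\\' c [c] l)

theorem applyAll_run_pass (cs : List Char) (hall : ∀ c ∈ cs, c ≠ '\\') (n : Nat)
    (rest : List Char) (hrest : rest = [] ∨ ∃ x t, rest = x :: t ∧ x ∉ cs ∧ x ≠ '\\') :
    applyAll cs (List.replicate n '\\' ++ rest)
      = List.replicate n '\\' ++ applyAll cs rest := by
  induction cs generalizing rest with
  | nil => rfl
  | cons c cs ih =>
    have hc : c ≠ '\\' := hall c (by simp)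
    simp only [applyAll, List.foldl]
    rw [rep2_run_pass c hc n rest (by
      rcases hrest with rfl | ⟨x, t, rfl, hxm, hxb⟩
      · exact Or.inl rfl
      · exact Or.inr ⟨x, t, rfl, fun h => hxm (h ▸ List.mem_cons_self ..)⟩)]
    have := ih (fun d hd => hall d (List.mem_cons_of_mem _ hd)) (rep2 '\\' c [c] rest) (by
      rcases hrest with rfl | ⟨x, t, rfl, hxm, hxb⟩
      · simp [rep2]
      · rw [rep2_skip _ _ _ _ _ hxb]
        exact Or.inr ⟨x, _, rfl, fun h => hxm (List.mem_cons_of_mem _ h), hxb⟩)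
    simpa [applyAll] using this

theorem applyAll_match (cs : List Char) (c : Char) (hmem : c ∈ cs) (hnd : cs.Nodup)
    (hall : ∀ d ∈ cs, d ≠ '\\') (n : Nat) (t : List Char) :
    applyAll cs (List.replicate (n+1) '\\' ++ c :: t)
      = List.replicate n '\\' ++ c :: applyAll cs t := by
  obtain ⟨cs1, cs2, rfl⟩ := List.mem_iff_append.mp hmem
  have hc : c ≠ '\\' := hall c hmem
  rw [List.nodup_append] at hnd
  have hc1 : c ∉ cs1 := fun h => (hnd.2.2 c h c (by simp) rfl).elim
  have hc2 : c ∉ cs2 := by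
    have := hnd.2.1
    simp only [List.nodup_cons] at this
    exact this.1
  have hsplit : ∀ m, applyAll (cs1 ++ c :: cs2) m = applyAll cs2 (rep2 '\\' c [c] (applyAll cs1 m)) := by
    intro m; simp [applyAll, List.foldl_append]
  rw [hsplit, hsplit]
  rw [applyAll_run_pass cs1 (fun d hd => hall d (by simp [hd])) (n+1) (c :: t)
      (Or.inr ⟨c, t, rfl, hc1, hc⟩)]
  rw [applyAll_cons cs1 c t hc]
  rw [rep2_match c hc n (applyAll cs1 t)]
  rw [applyAll_run_pass cs2 (fun d hd => hall d (by simp [hd])) n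
      (c :: rep2 '\\' c [c] (applyAll cs1 t)) (Or.inr ⟨c, _, rfl, hc2, hc⟩)]
  rw [applyAll_cons cs2 c _ hc]

theorem pvUnescape_skip (x : Char) (l : List Char) (hx : x ≠ '\\') :
    pvUnescape (x :: l) = x :: pvUnescape l := by
  cases l with
  | nil => rfl
  | cons y t => rw [pvUnescape, if_neg hx]

theorem pvUnescape_bs_bs (t : List Char) :
    pvUnescape ('\\' :: '\\' :: t) = '\\' :: pvUnescape t := by
  rw [pvUnescape, if_pos rfl, if_pos rfl]

theorem pvUnescape_bs_rec (d : Char) (t : List Char) (h : d ∈ pvRecognized) (hd : d ≠ '\\') :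
    pvUnescape ('\\' :: d :: t) = d :: pvUnescape t := by
  rw [pvUnescape, if_pos rfl, if_neg hd, if_pos h]

theorem pvUnescape_bs_other (d : Char) (t : List Char) (h : d ∉ pvRecognized) (hd : d ≠ '\\') :
    pvUnescape ('\\' :: d :: t) = '\\' :: pvUnescape (d :: t) := by
  rw [pvUnescape, if_pos rfl, if_neg hd, if_neg h]

theorem replicate_succ_append (n : Nat) (r : List Char) :
    List.replicate (n+1) '\\' ++ r = '\\' :: (List.replicate n '\\' ++ r) := by
  rw [List.replicate_succ, List.cons_append]

theorem pvUnescape_bs_nil (n : Nat) :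
    pvUnescape (List.replicate n '\\') = List.replicate ((n+1)/2) '\\' := by
  induction n using Nat.strong_induction_on with
  | _ n ih =>
    match n with
    | 0 => rfl
    | 1 => rfl
    | (m+2) =>
      rw [List.replicate_succ, List.replicate_succ, pvUnescape_bs_bs]
      rw [ih m (by omega)]
      rw [show ((m+2)+1)/2 = (m+1)/2 + 1 by omega, List.replicate_succ]

theorem pvUnescape_run_rec (n : Nat) (c : Char) (t : List Char)
    (hc : c ∈ pvRecognized) (hcb : c ≠ '\\') :
    pvUnescape (List.replicate (n+1) '\\' ++ c :: t)
      = List.replicate ((n+1)/2) '\\' ++ c :: pvUnescape t := by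
  induction n using Nat.strong_induction_on with
  | _ n ih =>
    match n with
    | 0 =>
      rw [replicate_succ_append]
      simp only [List.replicate_zero, List.nil_append]
      rw [pvUnescape_bs_rec c t hc hcb]
      rfl
    | 1 =>
      rw [replicate_succ_append, replicate_succ_append]
      simp only [List.replicate_zero, List.nil_append]
      rw [pvUnescape_bs_bs, pvUnescape_skip c t hcb]
      rfl
    | (m+2) =>
      rw [replicate_succ_append, replicate_succ_append, pvUnescape_bs_bs]
      rw [ih m (by omega)]
      rw [show ((m+2)+1)/2 = (m+1)/2 + 1 by omega, List.replicate_succ]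
      rfl

theorem pvUnescape_run_other (n : Nat) (x : Char) (t : List Char)
    (hx : x ∉ pvRecognized) (hxb : x ≠ '\\') :
    pvUnescape (List.replicate n '\\' ++ x :: t)
      = List.replicate ((n+1)/2) '\\' ++ x :: pvUnescape t := by
  induction n using Nat.strong_induction_on with
  | _ n ih =>
    match n with
    | 0 => simpa using pvUnescape_skip x t hxb
    | 1 =>
      rw [replicate_succ_append]
      simp only [List.replicate_zero, List.nil_append]
      rw [pvUnescape_bs_other x t hx hxb, pvUnescape_skip x t hxb]
      rfl
    | (m+2) =>
      rw [replicate_succ_append, replicate_succ_append, pvUnescape_bs_bs]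
      rw [ih m (by omega)]
      rw [show ((m+2)+1)/2 = (m+1)/2 + 1 by omega, List.replicate_succ]
      rfl

theorem pvRecognized_nodup : pvRecognized.Nodup := by
  have h : (pvRecognized.map Char.toNat).Nodup := by decide
  exact h.of_map _

theorem pvRecognized_no_bs : ∀ d ∈ pvRecognized, d ≠ '\\' := by
  intro d hd heq
  have hmem : d.toNat ∈ pvRecognized.map Char.toNat := List.mem_map_of_mem hd
  rw [heq] at hmem
  revert hmem; decide

/-- Core equivalence: A's 21 sequential replace passes equal B's single scan. -/
theorem core_eq : ∀ (N : Nat) (l : List Char), l.length ≤ N →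
    rep2 '\\' '\\' ['\\'] (applyAll pvRecognized l) = pvUnescape l := by
  intro N
  induction N with
  | zero =>
    intro l h
    cases l with
    | nil => rw [applyAll_nil]; rfl
    | cons c t => simp at h
  | succ N ih =>
    intro l hl
    have hdec : l = l.takeWhile (fun c => c == '\\') ++ l.dropWhile (fun c => c == '\\') :=
      (List.takeWhile_append_dropWhile).symm
    have hrep : l.takeWhile (fun c => c == '\\')
        = List.replicate (l.takeWhile (fun c => c == '\\')).length '\\' :=
      List.eq_replicate_iff.mpr ⟨rfl, fun b hb => by
        have := List.mem_takeWhile_imp hb; simpa using this⟩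
    set n := (l.takeWhile (fun c => c == '\\')).length with hn
    set rest := l.dropWhile (fun c => c == '\\') with hr
    rw [hrep] at hdec
    have hlen : n + rest.length = l.length := by
      have := congrArg List.length hdec; simp at this; omega
    cases hrestc : rest with
    | nil =>
      rw [hrestc] at hdec
      rw [hdec]
      rw [applyAll_run_pass pvRecognized pvRecognized_no_bs n [] (Or.inl rfl)]
      rw [applyAll_nil]
      have h2 := rep2_bs_run n [] (Or.inl rfl)
      rw [show rep2 '\\' '\\' ['\\'] [] = [] from rfl] at h2
      simp only [List.append_nil] at h2 ⊢
      rw [h2]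
      exact (pvUnescape_bs_nil n).symm
    | cons x t =>
      have hx : x ≠ '\\' := by
        have h0 := List.head?_dropWhile_not (fun c => c == '\\') l
        rw [← hr, hrestc] at h0
        simpa using h0
      have ht : t.length ≤ N := by
        rw [hrestc] at hlen; simp at hlen; omega
      rw [hrestc] at hdec
      rw [hdec]
      cases n with
      | zero =>
        simp only [List.replicate_zero, List.nil_append]
        rw [applyAll_cons pvRecognized x t hx]
        rw [rep2_skip '\\' '\\' ['\\'] x _ hx]
        rw [ih t ht]
        exact (pvUnescape_skip x t hx).symm
      | succ m =>
        by_cases hxr : x ∈ pvRecognized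
        · rw [applyAll_match pvRecognized x hxr pvRecognized_nodup pvRecognized_no_bs m t]
          rw [rep2_bs_run m (x :: applyAll pvRecognized t) (Or.inr ⟨x, _, rfl, hx⟩)]
          rw [rep2_skip '\\' '\\' ['\\'] x _ hx]
          rw [ih t ht]
          exact (pvUnescape_run_rec m x t hxr hx).symm
        · rw [applyAll_run_pass pvRecognized pvRecognized_no_bs (m+1) (x :: t)
              (Or.inr ⟨x, t, rfl, hxr, hx⟩)]
          rw [applyAll_cons pvRecognized x t hx]
          rw [rep2_bs_run (m+1) (x :: applyAll pvRecognized t) (Or.inr ⟨x, _, rfl, hx⟩)]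
          rw [rep2_skip '\\' '\\' ['\\'] x _ hx]
          rw [ih t ht]
          exact (pvUnescape_run_other (m+1) x t hxr hx).symm

theorem clean_eq (raw_path : String) : clean_file_path raw_path = clean_file_path_alt raw_path := by
  unfold clean_file_path clean_file_path_alt
  refine String.toList_inj.mp ?_
  simp only [pvReplacements, List.foldl, PySem.Str.toList_replace, String.toList_ofList]
  have := core_eq ((PySem.Str.stripChars (PySem.Str.strip raw_path) "'\"").toList).length
    ((PySem.Str.stripChars (PySem.Str.strip raw_path) "'\"").toList) (le_refl _)
  simp only [applyAll, pvRecognized, List.foldl] at this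
  simp only [show ("\\ ").toList = ['\\', ' '] from rfl,
    show (" ").toList = [' '] from rfl,
    show ("\\[").toList = ['\\', '['] from rfl,
    show ("[").toList = ['['] from rfl,
    show ("\\]").toList = ['\\', ']'] from rfl,
    show ("]").toList = [']'] from rfl,
    show ("\\(").toList = ['\\', '('] from rfl,
    show ("(").toList = ['('] from rfl,
    show ("\\)").toList = ['\\', ')'] from rfl,
    show (")").toList = [')'] from rfl,
    show ("\\#").toList = ['\\', '#'] from rfl,
    show ("#").toList = ['#'] from rfl,
    show ("\\&").toList = ['\\', '&'] from rfl,
    show ("&").toList = ['&'] from rfl,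
    show ("\\$").toList = ['\\', '$'] from rfl,
    show ("$").toList = ['$'] from rfl,
    show ("\\%").toList = ['\\', '%'] from rfl,
    show ("%").toList = ['%'] from rfl,
    show ("\\@").toList = ['\\', '@'] from rfl,
    show ("@").toList = ['@'] from rfl,
    show ("\\!").toList = ['\\', '!'] from rfl,
    show ("!").toList = ['!'] from rfl,
    show ("\\^").toList = ['\\', '^'] from rfl,
    show ("^").toList = ['^'] from rfl,
    show ("\\*").toList = ['\\', '*'] from rfl,
    show ("*").toList = ['*'] from rfl,
    show ("\\+").toList = ['\\', '+'] from rfl,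
    show ("+").toList = ['+'] from rfl,
    show ("\\=").toList = ['\\', '='] from rfl,
    show ("=").toList = ['='] from rfl,
    show ("\\{").toList = ['\\', '{'] from rfl,
    show ("{").toList = ['{'] from rfl,
    show ("\\}").toList = ['\\', '}'] from rfl,
    show ("}").toList = ['}'] from rfl,
    show ("\\|").toList = ['\\', '|'] from rfl,
    show ("|").toList = ['|'] from rfl,
    show ("\\\"").toList = ['\\', '"'] from rfl,
    show ("\"").toList = ['"'] from rfl,
    show ("\\'").toList = ['\\', '\''] from rfl,
    show ("'").toList = ['\''] from rfl,
    show ("\\\\").toList = ['\\', '\\'] from rfl,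
    show ("\\").toList = ['\\'] from rfl]
  simp only [replace_eq_rep2]
  exact this

-- ===== VERDICT (by name: the statement is the Claim_ definition above) =====
theorem clean_file_path_spec : Claim_equal_clean_file_path := by
  intro raw_path _
  unfold Spec_clean_file_path
  exact clean_eq raw_path
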